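-- pv_equiv track=rewrite | github.com/jcliquot/spe_mab_interference | serum_electrophoresis_interference.py | _find_beta2_bounds
-- ===== SOURCE A (Python) =====
-- FRACTION_NAMES = [
--     "",
--     "Albumin",
--     "Alpha-1 globulins",
--     "Alpha-2 globulins",
--     "Beta-1 globulins",
--     "Beta-2 globulins",
--     "Gamma globulins",
-- ]
--
-- def _find_beta2_bounds(fractions_coords: list[int], n_points: int) -> tuple[int | None, int | None]:
--     """Return the (start, end) index of the Beta-2 globulin zone, or (None, None)."""
--     fractions = sorted(fractions_coords)
--     current_start = 0
--     beta2_start = beta2_end = None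
--
--     for j, end in enumerate(fractions):
--         name = FRACTION_NAMES[j] if j < len(FRACTION_NAMES) else f"Segment {j + 1}"
--         if name == "Beta-2 globulins" and current_start < end:
--             beta2_start, beta2_end = current_start, end
--         current_start = end
--
--     # Check the final (rightmost) segment
--     last_name = (
--         FRACTION_NAMES[len(fractions)] if len(fractions) < len(FRACTION_NAMES)
--         else f"Segment {len(fractions) + 1}"
--     )
--     if last_name == "Beta-2 globulins":
--         beta2_start, beta2_end = current_start, n_points
--
--     return beta2_start, beta2_end
-- ===== SOURCE B (Python) =====
-- def _find_beta2_bounds(fractions_coords: list[int], n_points: int) -> tuple: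
--     """Return the (start, end) index of the Beta-2 globulin zone, or (None, None)."""
--     fractions = sorted(fractions_coords)
--     n = len(fractions)
--     if n >= 6:
--         start, end = fractions[4], fractions[5]
--         return (start, end) if start < end else (None, None)
--     if n == 5:
--         return fractions[4], n_points
--     return None, None
-- ===== Notes on version B (the rewrite author's own statement) =====
-- stated objective: simpler
-- what changed: B replaces A's enumerate-loop with FRACTION_NAMES matching and a current_start accumulator by a direct three-way dispatch on the length of the sorted list (n>=6: fractions[4]/fractions[5] with the start<end guard; n==5: (fractions[4], n_points); otherwise (None, None)).
import Mathlib
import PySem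

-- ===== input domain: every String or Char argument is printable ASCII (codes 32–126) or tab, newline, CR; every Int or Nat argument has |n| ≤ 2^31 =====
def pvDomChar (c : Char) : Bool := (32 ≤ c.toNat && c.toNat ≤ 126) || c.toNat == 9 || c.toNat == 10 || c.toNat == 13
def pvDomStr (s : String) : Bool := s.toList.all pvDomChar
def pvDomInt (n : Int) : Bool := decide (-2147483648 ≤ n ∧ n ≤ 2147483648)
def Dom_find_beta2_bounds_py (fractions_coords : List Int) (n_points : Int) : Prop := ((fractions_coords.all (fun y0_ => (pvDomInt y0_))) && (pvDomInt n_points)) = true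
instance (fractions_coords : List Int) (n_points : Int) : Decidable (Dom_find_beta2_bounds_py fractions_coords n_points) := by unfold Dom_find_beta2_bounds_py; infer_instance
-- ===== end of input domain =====

-- B replaces A's per-segment scan over enumerate + FRACTION_NAMES matching by a direct
-- three-way dispatch on the sorted list's length (simpler; return value only, no mutation).

-- ===== PORT A =====
def pvFRACTION_NAMES : List String :=
  ["", "Albumin", "Alpha-1 globulins", "Alpha-2 globulins", "Beta-1 globulins",
   "Beta-2 globulins", "Gamma globulins"]

-- the loop body of A: state = (current_start, (beta2_start, beta2_end))
def pvStepA (st : Int × (Option Int × Option Int)) (p : Int × Int) :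
    Int × (Option Int × Option Int) :=
  let j := p.1
  let e := p.2
  let name := if j < (pvFRACTION_NAMES.length : Int)
              then PySem.List.pyGetD pvFRACTION_NAMES j ""
              else "Segment " ++ PySem.Int.toStr (j + 1)
  let b2 := if name = "Beta-2 globulins" ∧ st.1 < e then (some st.1, some e) else st.2
  (e, b2)

def find_beta2_bounds_py (fractions_coords : List Int) (n_points : Int) :
    Option Int × Option Int :=
  let fractions := PySem.List.sorted fractions_coords (fun x => x) false
  let st := (PySem.List.enumerate fractions 0).foldl pvStepA (0, (none, none))
  let lastName := if (fractions.length : Int) < (pvFRACTION_NAMES.length : Int)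
                  then PySem.List.pyGetD pvFRACTION_NAMES (fractions.length : Int) ""
                  else "Segment " ++ PySem.Int.toStr ((fractions.length : Int) + 1)
  if lastName = "Beta-2 globulins" then (some st.1, some n_points) else st.2

-- ===== PORT B =====
-- B's length dispatch; the in-range indexings fractions[4], fractions[5] under the
-- length guards are rendered as the corresponding patterns.
def find_beta2_bounds_py_alt (fractions_coords : List Int) (n_points : Int) :
    Option Int × Option Int :=
  match PySem.List.sorted fractions_coords (fun x => x) false with
  | _ :: _ :: _ :: _ :: s :: e :: _ =>          -- n ≥ 6
      if s < e then (some s, some e) else (none, none)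
  | [_, _, _, _, s] => (some s, some n_points)  -- n == 5
  | _ => (none, none)

-- ===== PRECONDITION & SPEC =====
def Spec_find_beta2_bounds_py (fractions_coords : List Int) (n_points : Int) (out : Option Int × Option Int) : Prop := out = find_beta2_bounds_py_alt fractions_coords n_points
instance (fractions_coords : List Int) (n_points : Int) (out : Option Int × Option Int) : Decidable (Spec_find_beta2_bounds_py fractions_coords n_points out) := by unfold Spec_find_beta2_bounds_py; infer_instance

-- ===== CLAIM (what is proved, stated in full; the proofs are below) =====
def Claim_equal_find_beta2_bounds_py : Prop := ∀ (fractions_coords : List Int) (n_points : Int), Dom_find_beta2_bounds_py fractions_coords n_points → Spec_find_beta2_bounds_py fractions_coords n_points (find_beta2_bounds_py fractions_coords n_points)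

-- ===== LEMMAS AND PROOFS =====

theorem segment_ne_beta2 (s : String) : ("Segment " ++ s) ≠ "Beta-2 globulins" := by
  intro h
  have h' := congrArg String.toList h
  simp [String.toList_append] at h'

theorem nmlen : ((pvFRACTION_NAMES.length : Nat) : Int) = 7 := by rfl
theorem nm0 : PySem.List.pyGetD pvFRACTION_NAMES 0 "" = "" := by rfl
theorem nm1 : PySem.List.pyGetD pvFRACTION_NAMES 1 "" = "Albumin" := by rfl
theorem nm2 : PySem.List.pyGetD pvFRACTION_NAMES 2 "" = "Alpha-1 globulins" := by rfl
theorem nm3 : PySem.List.pyGetD pvFRACTION_NAMES 3 "" = "Alpha-2 globulins" := by rfl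
theorem nm4 : PySem.List.pyGetD pvFRACTION_NAMES 4 "" = "Beta-1 globulins" := by rfl
theorem nm5 : PySem.List.pyGetD pvFRACTION_NAMES 5 "" = "Beta-2 globulins" := by rfl
theorem nm6 : PySem.List.pyGetD pvFRACTION_NAMES 6 "" = "Gamma globulins" := by rfl

-- past index 5 the loop never changes the beta2 fields
theorem foldl_pvStepA_tail (rest : List Int) (j : Int) (hj : 6 ≤ j)
    (cs : Int) (b : Option Int × Option Int) :
    ((PySem.List.enumerate rest j).foldl pvStepA (cs, b)).2 = b := by
  induction rest generalizing j cs with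
  | nil => simp [PySem.List.enumerate]
  | cons x xs ih =>
      rw [PySem.List.enumerate_cons]
      have hstep : pvStepA (cs, b) (j, x) = (x, b) := by
        rcases eq_or_lt_of_le hj with h6 | h7
        · subst h6; norm_num [pvStepA, nmlen, nm6]; simp
        · have : ¬ (j < ((pvFRACTION_NAMES.length : Nat) : Int)) := by rw [nmlen]; omega
          simp [pvStepA, this, segment_ne_beta2]
      simp only [List.foldl_cons, hstep]
      exact ih _ (by omega) _

-- ===== VERDICT (by name: the statement is the Claim_ definition above) =====
theorem find_beta2_bounds_py_spec : Claim_equal_find_beta2_bounds_py := by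
  intro fc np _
  unfold Spec_find_beta2_bounds_py find_beta2_bounds_py find_beta2_bounds_py_alt
  rcases hl : PySem.List.sorted fc (fun x => x) false with
    _ | ⟨a, _ | ⟨b, _ | ⟨c, _ | ⟨d, _ | ⟨s, _ | ⟨e, rest⟩⟩⟩⟩⟩⟩
  · norm_num [PySem.List.enumerate, List.foldl, pvStepA, nm0, nmlen]; simp
  · norm_num [PySem.List.enumerate, List.foldl, pvStepA, nm0, nm1, nmlen]; simp
  · norm_num [PySem.List.enumerate, List.foldl, pvStepA, nm0, nm1, nm2, nmlen]; simp
  · norm_num [PySem.List.enumerate, List.foldl, pvStepA, nm0, nm1, nm2, nm3, nmlen]; simp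
  · norm_num [PySem.List.enumerate, List.foldl, pvStepA, nm0, nm1, nm2, nm3, nm4, nmlen]; simp
  · norm_num [PySem.List.enumerate, List.foldl, pvStepA, nm0, nm1, nm2, nm3, nm4, nm5, nmlen]
  · -- length ≥ 6
    simp only [PySem.List.enumerate_cons, List.foldl_cons, pvStepA]
    norm_num [nm0, nm1, nm2, nm3, nm4, nm5, nmlen]
    rw [foldl_pvStepA_tail rest 6 (by omega)]
    rcases rest with _ | ⟨y, ys⟩
    · norm_num [nm6, nmlen]
      by_cases hse : s < e <;> simp [hse]
    · have hc : ¬ (((ys.length : Nat) : Int) + 1 + 1 + 1 + 1 + 1 + 1 + 1 < 7) := by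
        omega
      by_cases hse : s < e <;> simp [hse, hc, segment_ne_beta2]
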